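-- pv_equiv track=rewrite | github.com/cocococoa/re2py | resite/reviz/views.py | emphasized_string
-- ===== SOURCE A (Python) =====
-- def emphasized_string(string: str, indexes):
--     ret = ""
--     for i, c in enumerate(string):
--         if i in indexes:
--             ret += f'<font color="red">{c}</font>'
--         else:
--             ret += c
--     return ret
-- ===== SOURCE B (Python) =====
-- def emphasized_string(string, indexes):
--     marks = sorted(set(indexes) & set(range(len(string))))
--     parts = []
--     cursor = 0
--     for pos in marks:
--         parts.append(string[cursor:pos])
--         parts.append('<font color="red">' + string[pos] + '</font>')
--         cursor = pos + 1
--     parts.append(string[cursor:])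
--     return "".join(parts)
-- ===== Notes on version B (the rewrite author's own statement) =====
-- stated objective: alternative
-- what changed: Instead of testing every character's index for list membership and growing a string char by char, B intersects the index set with range(len(string)) once, sorts it, and walks a cursor appending whole slices plus the wrapped characters, joined at the end.
import Mathlib
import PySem

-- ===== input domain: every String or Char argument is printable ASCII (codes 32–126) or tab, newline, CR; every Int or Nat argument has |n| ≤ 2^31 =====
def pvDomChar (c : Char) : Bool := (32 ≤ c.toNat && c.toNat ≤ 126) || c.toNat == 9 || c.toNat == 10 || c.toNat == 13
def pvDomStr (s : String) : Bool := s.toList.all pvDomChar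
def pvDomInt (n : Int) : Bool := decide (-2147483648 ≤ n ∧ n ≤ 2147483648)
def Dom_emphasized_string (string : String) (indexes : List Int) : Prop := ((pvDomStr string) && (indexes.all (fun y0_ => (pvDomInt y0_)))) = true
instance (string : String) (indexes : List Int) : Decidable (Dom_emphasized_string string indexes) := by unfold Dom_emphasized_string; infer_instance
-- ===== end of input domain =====

-- B replaces A's per-character membership test with a sorted set intersection of the
-- indexes with range(len(string)) and a cursor walk copying whole slices (alternative).

-- the f-string '<font color="red">{c}</font>' as a list of chars
def pvWrap (c : Char) : List Char := "<font color=\"red\">".toList ++ [c] ++ "</font>".toList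

-- ===== PORT A =====
def emphasized_string (string : String) (indexes : List Int) : String :=
  String.ofList ((PySem.List.enumerate string.toList).foldl
    (fun ret ic => if indexes.contains ic.1 then ret ++ pvWrap ic.2 else ret ++ [ic.2]) [])

-- ===== PORT B =====
def emphasized_string_alt (string : String) (indexes : List Int) : String :=
  let cs := string.toList
  let marks : List Int := PySem.List.sorted
    (PySem.Set.inter (PySem.Set.ofList indexes)
      (PySem.Set.ofList (PySem.List.pyRange 0 (cs.length : Int) 1)))
    (fun x => x) false
  let r := marks.foldl
    (fun (st : Int × List (List Char)) pos =>
      (pos + 1, st.2 ++ [PySem.List.slice cs (some st.1) (some pos)]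
               ++ [pvWrap (PySem.List.pyGetD cs pos ' ')]))   -- string[pos]; pos is always in range
    (0, [])
  String.ofList (PySem.Chars.join [] (r.2 ++ [PySem.List.slice cs (some r.1) none]))

-- ===== PRECONDITION & SPEC =====
def Spec_emphasized_string (string : String) (indexes : List Int) (out : String) : Prop := out = emphasized_string_alt string indexes
instance (string : String) (indexes : List Int) (out : String) : Decidable (Spec_emphasized_string string indexes out) := by unfold Spec_emphasized_string; infer_instance

-- ===== CLAIM (what is proved, stated in full; the proofs are below) =====
def Claim_equal_emphasized_string : Prop := ∀ (string : String) (indexes : List Int), Dom_emphasized_string string indexes → Spec_emphasized_string string indexes (emphasized_string string indexes)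

-- ===== LEMMAS AND PROOFS =====

-- reference rendering: characters of `l` starting at global index `s`, each wrapped iff `P`
def emphFrom (P : Nat → Bool) : List Char → Nat → List Char
  | [], _ => []
  | ch :: rest, s => (if P s then pvWrap ch else [ch]) ++ emphFrom P rest (s + 1)

def emphIdx (P : Nat → Bool) (cs : List Char) (c : Nat) : List Char := emphFrom P (cs.drop c) c

theorem emphFrom_congr (P Q : Nat → Bool) (l : List Char) (s : Nat)
    (h : ∀ i, s ≤ i → i < s + l.length → P i = Q i) : emphFrom P l s = emphFrom Q l s := by
  induction l generalizing s with
  | nil => rfl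
  | cons ch rest ih =>
      simp only [emphFrom]
      rw [h s le_rfl (by simp only [List.length_cons]; omega),
         ih (s + 1) (fun i h1 h2 => h i (by omega) (by simp only [List.length_cons]; omega))]

theorem emphFrom_false (l : List Char) (s : Nat) : emphFrom (fun _ => false) l s = l := by
  induction l generalizing s with
  | nil => rfl
  | cons ch rest ih => simp [emphFrom, ih]

theorem emphIdx_seg (P : Nat → Bool) (cs : List Char) (c p : Nat)
    (hcp : c ≤ p) (hp : p < cs.length)
    (hfalse : ∀ i, c ≤ i → i < p → P i = false) (htrue : P p = true) :
    emphIdx P cs c = (cs.drop c).take (p - c) ++ pvWrap cs[p] ++ emphIdx P cs (p + 1) := by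
  rcases Nat.eq_or_lt_of_le hcp with h | h
  · subst h
    have hdrop : cs.drop c = cs[c] :: cs.drop (c + 1) := List.drop_eq_getElem_cons hp
    simp only [emphIdx, hdrop, emphFrom, htrue, if_pos, Nat.sub_self, List.take_zero,
      List.nil_append]
  · have hc : c < cs.length := lt_of_lt_of_le h (Nat.le_of_lt hp)
    have hdrop : cs.drop c = cs[c] :: cs.drop (c + 1) := List.drop_eq_getElem_cons hc
    have step := emphIdx_seg P cs (c + 1) p (by omega) hp
      (fun i h1 h2 => hfalse i (by omega) h2) htrue
    have hhead : emphIdx P cs c = cs[c] :: emphIdx P cs (c + 1) := by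
      unfold emphIdx
      rw [hdrop]
      rw [show emphFrom P (cs[c] :: cs.drop (c + 1)) c
            = (if P c then pvWrap cs[c] else [cs[c]]) ++ emphFrom P (cs.drop (c + 1)) (c + 1)
          from rfl]
      rw [hfalse c le_rfl h]
      simp
    have hk : p - c = (p - (c + 1)) + 1 := by omega
    rw [hhead, step, hk, hdrop, List.take_succ_cons]
    simp
termination_by p - c

-- A's loop over enumerate equals the reference rendering
theorem portA_loop (indexes : List Int) (cs : List Char) (k : Nat) (acc : List Char) :
    (PySem.List.enumerate cs (k : Int)).foldl
      (fun ret ic => if indexes.contains ic.1 then ret ++ pvWrap ic.2 else ret ++ [ic.2]) acc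
    = acc ++ emphFrom (fun i => indexes.contains (i : Int)) cs k := by
  induction cs generalizing k acc with
  | nil => simp [PySem.List.enumerate_nil, emphFrom]
  | cons ch rest ih =>
      rw [PySem.List.enumerate_cons]
      simp only [List.foldl_cons]
      have hk : (k : Int) + 1 = ((k + 1 : Nat) : Int) := by push_cast; ring
      rw [hk, ih]
      simp only [emphFrom]
      by_cases h : ((k : Int) ∈ indexes) <;> simp [h]

-- ''.join on an empty separator is concatenation
theorem join_empty (ps : List (List Char)) : PySem.Chars.join [] ps = ps.flatten := by
  induction ps with
  | nil => simp [PySem.Chars.join_nil]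
  | cons x t ih =>
      cases t with
      | nil => simp [PySem.Chars.join_singleton]
      | cons y u => rw [PySem.Chars.join_cons_cons]; simp_all

-- B's cursor loop over a strictly increasing in-range mark list equals the reference rendering
theorem portB_loop (cs : List Char) (marks : List Int) (c : Nat) (parts : List (List Char))
    (hpw : marks.Pairwise (· < ·))
    (hmem : ∀ m ∈ marks, (c : Int) ≤ m ∧ m < (cs.length : Int)) :
    ((marks.foldl
        (fun (st : Int × List (List Char)) pos =>
          (pos + 1, st.2 ++ [PySem.List.slice cs (some st.1) (some pos)]
                   ++ [pvWrap (PySem.List.pyGetD cs pos ' ')])) ((c : Int), parts)).2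
      ++ [PySem.List.slice cs (some (marks.foldl
        (fun (st : Int × List (List Char)) pos =>
          (pos + 1, st.2 ++ [PySem.List.slice cs (some st.1) (some pos)]
                   ++ [pvWrap (PySem.List.pyGetD cs pos ' ')])) ((c : Int), parts)).1) none]).flatten
    = parts.flatten ++ emphIdx (fun i => marks.contains (i : Int)) cs c := by
  induction marks generalizing c parts with
  | nil =>
      simp only [List.foldl_nil, List.flatten_append, List.flatten_cons, List.flatten_nil,
        List.append_nil]
      rw [PySem.List.slice_from_natCast]
      have : emphIdx (fun i => List.contains ([] : List Int) (i : Int)) cs c = cs.drop c := by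
        simp only [emphIdx]
        rw [emphFrom_congr _ (fun _ => false) _ _ (by intro i _ _; simp)]
        exact emphFrom_false _ _
      rw [this]
  | cons pos rest ih =>
      obtain ⟨h0, hn⟩ := hmem pos List.mem_cons_self
      have hrest : ∀ m ∈ rest, pos < m := by
        intro m hm; exact (List.pairwise_cons.mp hpw).1 m hm
      set p : Nat := pos.toNat with hpdef
      have hpos : pos = (p : Int) := by omega
      have hpn : p < cs.length := by omega
      have hcp : c ≤ p := by omega
      simp only [List.foldl_cons]
      have hcur : pos + 1 = ((p + 1 : Nat) : Int) := by omega
      rw [hcur, ih (p + 1) _ (List.pairwise_cons.mp hpw).2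
        (fun m hm => ⟨by have := hrest m hm; omega, (hmem m (List.mem_cons_of_mem _ hm)).2⟩)]
      -- identify the appended pieces
      have hget : PySem.List.pyGetD cs pos ' ' = cs[p] := by
        rw [hpos, PySem.List.pyGetD_natCast]; exact List.getD_eq_getElem _ _ hpn
      have hslice : PySem.List.slice cs (some (c : Int)) (some pos) = (cs.drop c).take (p - c) := by
        rw [hpos, PySem.List.slice_natCast]
      rw [hget, hslice]
      have hseg := emphIdx_seg (fun i => List.contains (pos :: rest) (i : Int)) cs c p hcp hpn
        (by intro i h1 h2
            simp only [List.contains_cons]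
            have h3 : ((i : Int) == pos) = false := by simp; omega
            have h4 : ((i : Int) ∉ rest) := fun hmem' => by have := hrest _ hmem'; omega
            simp [h3, h4])
        (by simp [hpos])
      rw [hseg]
      have hcongr : emphIdx (fun i => List.contains (pos :: rest) (i : Int)) cs (p + 1)
          = emphIdx (fun i => rest.contains (i : Int)) cs (p + 1) := by
        apply emphFrom_congr
        intro i h1 _
        simp only [List.contains_cons]
        have : ((i : Int) == pos) = false := by simp; omega
        simp [this]
      rw [hcongr]
      simp [List.append_assoc]

theorem main_list (cs : List Char) (indexes : List Int) :
    (PySem.List.enumerate cs).foldl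
      (fun ret ic => if indexes.contains ic.1 then ret ++ pvWrap ic.2 else ret ++ [ic.2]) []
    = PySem.Chars.join [] (((PySem.List.sorted
        (PySem.Set.inter (PySem.Set.ofList indexes)
          (PySem.Set.ofList (PySem.List.pyRange 0 (cs.length : Int) 1)))
        (fun x => x) false).foldl
        (fun (st : Int × List (List Char)) pos =>
          (pos + 1, st.2 ++ [PySem.List.slice cs (some st.1) (some pos)]
                   ++ [pvWrap (PySem.List.pyGetD cs pos ' ')])) (0, [])).2
      ++ [PySem.List.slice cs (some ((PySem.List.sorted
        (PySem.Set.inter (PySem.Set.ofList indexes)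
          (PySem.Set.ofList (PySem.List.pyRange 0 (cs.length : Int) 1)))
        (fun x => x) false).foldl
        (fun (st : Int × List (List Char)) pos =>
          (pos + 1, st.2 ++ [PySem.List.slice cs (some st.1) (some pos)]
                   ++ [pvWrap (PySem.List.pyGetD cs pos ' ')])) (0, [])).1) none]) := by
  set inter0 : List Int := PySem.Set.inter (PySem.Set.ofList indexes)
    (PySem.Set.ofList (PySem.List.pyRange 0 (cs.length : Int) 1)) with hinter
  set marks : List Int := PySem.List.sorted inter0 (fun x => x) false with hmarks
  have hnd : inter0.Nodup :=
    PySem.Set.nodup_inter _ _ (PySem.Set.nodup_ofList _)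
  have hpw : marks.Pairwise (· < ·) := by
    rw [hmarks, show inter0 = PySem.Set.ofList inter0 from
      (PySem.Set.ofList_eq_self_of_nodup _ hnd).symm]
    exact PySem.List.sorted_ofList_pairwise_lt _
  have hmemiff : ∀ x : Int, x ∈ marks ↔ (x ∈ indexes ∧ 0 ≤ x ∧ x < (cs.length : Int)) := by
    intro x
    rw [hmarks, PySem.List.mem_sorted, hinter, PySem.Set.mem_inter, PySem.Set.mem_ofList,
      PySem.Set.mem_ofList, PySem.List.mem_pyRange_one]
  have hA := portA_loop indexes cs 0 []
  have hB := portB_loop cs marks 0 [] hpw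
    (fun m hm => by have := (hmemiff m).mp hm; exact ⟨by omega, this.2.2⟩)
  simp only [Nat.cast_zero] at hA hB
  rw [hA, join_empty, hB]
  simp only [List.flatten_nil, List.nil_append, emphIdx, List.drop_zero]
  apply emphFrom_congr
  intro i _ h2
  have hiff : ((i : Int) ∈ marks) ↔ ((i : Int) ∈ indexes) := by
    rw [hmemiff]
    exact ⟨fun h => h.1, fun h => ⟨h, Int.natCast_nonneg i, by exact_mod_cast (by omega : i < cs.length)⟩⟩
  simp [List.contains_eq_mem, hiff]

-- ===== VERDICT (by name: the statement is the Claim_ definition above) =====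
theorem emphasized_string_spec : Claim_equal_emphasized_string := by
  intro string indexes _
  unfold Spec_emphasized_string
  exact congrArg String.ofList (main_list string.toList indexes)
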